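-- pv_equiv track=rewrite | github.com/blackpeachDio/RawAgent | memory/extract_store.py | _truncate_rounds_by_char_budget
-- ===== SOURCE A (Python) =====
-- def _format_rounds_for_prompt(rounds: list[tuple[str, str]]) -> str:
--     lines: list[str] = []
--     base = len(rounds)
--     for idx, (u, a) in enumerate(rounds):
--         turn_no = idx + 1
--         lines.append(f"【第{turn_no}轮】（共{base}轮，自旧到新）")
--         lines.append(f"用户：{u}")
--         lines.append(f"助手：{a}")
--         lines.append("")
--     return "\n".join(lines).strip()
--
-- def _truncate_rounds_by_char_budget(
--         rounds: list[tuple[str, str]],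
--         max_chars: int,
-- ) -> list[tuple[str, str]]:
--     """从最早轮开始丢弃，直到总长度不超过 max_chars。"""
--     r = list(rounds)
--     while r and len(_format_rounds_for_prompt(r)) > max_chars:
--         r.pop(0)
--     return r
-- ===== SOURCE B (Python) =====
-- def _truncate_rounds_by_char_budget(
--         rounds: list[tuple[str, str]],
--         max_chars: int,
-- ) -> list[tuple[str, str]]:
--     """Arithmetic re-implementation: the formatted length of the remaining rounds is
--     maintained by O(1) accumulator updates instead of re-building the string each step."""
--     n = len(rounds)
--     if n == 0:
--         return []
--     # what .strip() removes from the end: the final newline plus the trailing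
--     # whitespace of the last assistant message (the last round never changes)
--     last_a = rounds[-1][1]
--     t = len(last_a) - len(last_a.rstrip())
--     pay = sum(len(u) + len(a) for u, a in rounds)
--     dsum = sum(len(str(i)) for i in range(1, n + 1))
--     r = rounds
--     m = n
--     while m:
--         # formatted length of r: payload + turn-number digits + m fixed headers
--         # (13 chars + digits of m) + "用户："/"助手：" (3+3) + 4m-1 newlines,
--         # minus 1+t stripped at the end
--         length = pay + dsum + m * (19 + len(str(m))) + 4 * m - 2 - t
--         if length <= max_chars:
--             return r
--         u, a = r[0]
--         pay -= len(u) + len(a)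
--         dsum -= len(str(m))
--         r = r[1:]
--         m -= 1
--     return []
-- ===== Notes on version B (the rewrite author's own statement) =====
-- stated objective: faster
-- what changed: Instead of re-building and re-measuring the whole formatted prompt after every dropped round, B derives the formatted length once in closed form (payload chars + turn-number digits + per-round header/label constants + newlines - stripped trailing whitespace) and updates it with O(1) integer accumulator subtractions per dropped round.
import Mathlib
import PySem

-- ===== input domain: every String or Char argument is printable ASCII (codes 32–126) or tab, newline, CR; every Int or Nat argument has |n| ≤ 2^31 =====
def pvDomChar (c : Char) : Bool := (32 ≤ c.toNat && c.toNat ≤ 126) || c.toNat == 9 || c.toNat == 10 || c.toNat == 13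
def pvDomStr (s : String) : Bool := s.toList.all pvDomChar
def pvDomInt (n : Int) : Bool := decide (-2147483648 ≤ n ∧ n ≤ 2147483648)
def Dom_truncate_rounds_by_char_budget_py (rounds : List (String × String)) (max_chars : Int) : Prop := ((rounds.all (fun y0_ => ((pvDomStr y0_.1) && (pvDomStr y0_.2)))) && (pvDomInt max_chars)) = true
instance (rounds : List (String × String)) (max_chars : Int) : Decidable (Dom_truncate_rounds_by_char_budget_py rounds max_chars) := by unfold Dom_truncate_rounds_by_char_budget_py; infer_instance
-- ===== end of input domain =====

-- B replaces A's repeated string formatting by a single pass that keeps the formatted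
-- length in integer accumulators (objective: faster, the per-step reformat disappears).

-- ===== PORT A =====
-- _format_rounds_for_prompt
def pvFmt (rounds : List (String × String)) : String :=
  let base : Int := (rounds.length : Int)
  let lines : List String :=
    (PySem.List.enumerate rounds).foldl
      (fun ls p =>
        let turn_no : Int := p.1 + 1
        (((ls ++ ["【第" ++ PySem.Int.toStr turn_no ++ "轮】（共" ++ PySem.Int.toStr base ++ "轮，自旧到新）"])
          ++ ["用户：" ++ p.2.1])
          ++ ["助手：" ++ p.2.2])
          ++ [""])
      []
  PySem.Str.strip (PySem.Str.join "\n" lines)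

-- the while loop: pop from the front while the formatted text is too long
def pvAgo (max_chars : Int) : List (String × String) → List (String × String)
  | [] => []
  | p :: tail =>
    if PySem.Str.len (pvFmt (p :: tail)) > max_chars then pvAgo max_chars tail
    else p :: tail

def truncate_rounds_by_char_budget_py (rounds : List (String × String)) (max_chars : Int) : List (String × String) :=
  pvAgo max_chars rounds

-- ===== PORT B =====
-- the while loop of Source B: m, pay, dsum are the running accumulators
def pvBgo (max_chars t : Int) : List (String × String) → Int → Int → Int → List (String × String)
  | [], _, _, _ => []
  | (u, a) :: tail, m, pay, dsum =>
    let length := pay + dsum + m * (19 + PySem.Str.len (PySem.Int.toStr m)) + 4 * m - 2 - t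
    if length ≤ max_chars then (u, a) :: tail
    else pvBgo max_chars t tail (m - 1) (pay - (PySem.Str.len u + PySem.Str.len a))
          (dsum - PySem.Str.len (PySem.Int.toStr m))

def truncate_rounds_by_char_budget_py_alt (rounds : List (String × String)) (max_chars : Int) : List (String × String) :=
  if rounds.length = 0 then []
  else
    -- rounds[-1][1]; rounds is nonempty here, so the index is in range
    let last_a := (PySem.List.pyGetD rounds (-1) ("", "")).2
    let t := PySem.Str.len last_a - PySem.Str.len (PySem.Str.rstrip last_a)
    let pay := (rounds.map (fun p => PySem.Str.len p.1 + PySem.Str.len p.2)).sum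
    let dsum := ((PySem.List.pyRange 1 ((rounds.length : Int) + 1)).map
                  (fun i => PySem.Str.len (PySem.Int.toStr i))).sum
    pvBgo max_chars t rounds (rounds.length : Int) pay dsum

-- ===== PRECONDITION & SPEC =====
def Spec_truncate_rounds_by_char_budget_py (rounds : List (String × String)) (max_chars : Int) (out : List (String × String)) : Prop := out = truncate_rounds_by_char_budget_py_alt rounds max_chars
instance (rounds : List (String × String)) (max_chars : Int) (out : List (String × String)) : Decidable (Spec_truncate_rounds_by_char_budget_py rounds max_chars out) := by unfold Spec_truncate_rounds_by_char_budget_py; infer_instance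

-- ===== CLAIM (what is proved, stated in full; the proofs are below) =====
def Claim_equal_truncate_rounds_by_char_budget_py : Prop := ∀ (rounds : List (String × String)) (max_chars : Int), Dom_truncate_rounds_by_char_budget_py rounds max_chars → Spec_truncate_rounds_by_char_budget_py rounds max_chars (truncate_rounds_by_char_budget_py rounds max_chars)

-- ===== LEMMAS AND PROOFS =====

-- digit length of str(i)
def pvDlen (i : Int) : Int := PySem.Str.len (PySem.Int.toStr i)

-- one round's four lines, for base total rounds (proof-side description of A's fold)
def pvBlk (base : Int) (p : Int × (String × String)) : List String :=
  ["【第" ++ PySem.Int.toStr (p.1 + 1) ++ "轮】（共" ++ PySem.Int.toStr base ++ "轮，自旧到新）",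
   "用户：" ++ p.2.1, "助手：" ++ p.2.2, ""]

-- the joined (pre-strip) character list for base b, first index s
def pvJ (b : Int) (s : Int) (r : List (String × String)) : List Char :=
  PySem.Chars.join ['\n'] (((PySem.List.enumerate r s).flatMap (pvBlk b)).map String.toList)

def pvPay (r : List (String × String)) : Int :=
  (r.map (fun p => PySem.Str.len p.1 + PySem.Str.len p.2)).sum

def pvDsum (s : Int) (n : Nat) : Int := ((List.range n).map (fun (i : Nat) => pvDlen (s + (i : Int) + 1))).sum

def pvW (cs : List Char) : Nat := (cs.reverse.takeWhile PySem.Chars.isspace).length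

lemma pv_lines_eq (rounds : List (String × String)) :
    ((PySem.List.enumerate rounds).foldl
      (fun ls p =>
        let turn_no : Int := p.1 + 1
        (((ls ++ ["【第" ++ PySem.Int.toStr turn_no ++ "轮】（共" ++ PySem.Int.toStr (rounds.length : Int) ++ "轮，自旧到新）"])
          ++ ["用户：" ++ p.2.1])
          ++ ["助手：" ++ p.2.2])
          ++ [""])
      []) = (PySem.List.enumerate rounds).flatMap (pvBlk (rounds.length : Int)) := by
  rw [show (fun (ls : List String) (p : ℤ × (String × String)) =>
        let turn_no : Int := p.1 + 1
        (((ls ++ ["【第" ++ PySem.Int.toStr turn_no ++ "轮】（共" ++ PySem.Int.toStr (rounds.length : Int) ++ "轮，自旧到新）"])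
          ++ ["用户：" ++ p.2.1])
          ++ ["助手：" ++ p.2.2])
          ++ [""]) = fun ls p => ls ++ pvBlk (rounds.length : Int) p from by
      funext ls p; simp [pvBlk]]
  simpa using PySem.List.foldl_append_eq_flatMap (pvBlk (rounds.length : Int)) (PySem.List.enumerate rounds) []

lemma pv_join_append (sep : List Char) (xs ys : List (List Char)) (hx : xs ≠ []) (hy : ys ≠ []) :
    PySem.Chars.join sep (xs ++ ys) = PySem.Chars.join sep xs ++ sep ++ PySem.Chars.join sep ys := by
  induction xs with
  | nil => exact absurd rfl hx
  | cons x xs ih =>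
    cases xs with
    | nil =>
      cases ys with
      | nil => exact absurd rfl hy
      | cons y ys' =>
        simp [PySem.Chars.join_singleton, PySem.Chars.join_cons_cons, List.append_assoc]
    | cons x2 xs2 =>
      have h2 := ih (by simp) 
      simp only [List.cons_append, PySem.Chars.join_cons_cons] at *
      rw [h2]
      simp [List.append_assoc]

lemma pv_enum_cons (p : String × String) (tl : List (String × String)) (s : Int) :
    PySem.List.enumerate (p :: tl) s = (s, p) :: PySem.List.enumerate tl (s + 1) := by
  rfl

lemma pvJ_cons (b s : Int) (p : String × String) (q : String × String) (tl : List (String × String)) :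
    pvJ b s (p :: q :: tl) =
      (("【第" ++ PySem.Int.toStr (s + 1) ++ "轮】（共" ++ PySem.Int.toStr b ++ "轮，自旧到新）").toList
        ++ '\n' :: ("用户：" ++ p.1).toList ++ '\n' :: ("助手：" ++ p.2).toList ++ '\n' :: [])
      ++ '\n' :: pvJ b (s + 1) (q :: tl) := by
  rw [pvJ, pv_enum_cons, List.flatMap_cons, List.map_append,
    pv_join_append _ _ _ (by simp [pvBlk]) (by rw [pv_enum_cons]; simp [pvBlk])]
  simp [pvJ, pvBlk, PySem.Chars.join_cons_cons, PySem.Chars.join_singleton, List.append_assoc]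

lemma pvJ_single (b s : Int) (p : String × String) :
    pvJ b s [p] =
      ("【第" ++ PySem.Int.toStr (s + 1) ++ "轮】（共" ++ PySem.Int.toStr b ++ "轮，自旧到新）").toList
        ++ '\n' :: ("用户：" ++ p.1).toList ++ '\n' :: ("助手：" ++ p.2).toList ++ '\n' :: [] := by
  have hnil : PySem.List.enumerate ([] : List (String × String)) (s + 1) = [] := rfl
  rw [pvJ, pv_enum_cons, hnil]
  simp [pvBlk, PySem.Chars.join_cons_cons, PySem.Chars.join_singleton, List.append_assoc]

lemma pv_dsum_shift (s : Int) (k : Nat) :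
    pvDsum s (k + 1) = pvDlen (s + 1) + pvDsum (s + 1) k := by
  simp only [pvDsum, List.range_succ_eq_map, List.map_cons, List.sum_cons, List.map_map]
  congr 1
  · norm_num
  · congr 1
    apply List.map_congr_left
    intro i _
    simp only [Function.comp]
    congr 1
    push_cast
    ring

lemma pvJ_len (b : Int) : ∀ (r : List (String × String)) (s : Int), r ≠ [] →
    ((pvJ b s r).length : Int) =
      pvPay r + pvDsum s r.length + (r.length : Int) * (13 + pvDlen b) + 10 * r.length - 1 := by
  intro r
  induction r with
  | nil => intro s h; exact absurd rfl h
  | cons p tail ih =>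
    intro s _
    cases tail with
    | nil =>
      rw [pvJ_single]
      simp [String.toList_append, pvPay, pvDsum, pvDlen, PySem.Str.len]
      ring
    | cons q tl =>
      rw [pvJ_cons]
      have hih := ih (s + 1) (by simp)
      have hshift := pv_dsum_shift s (tl.length + 1)
      simp only [List.length_cons] at *
      simp [String.toList_append, List.length_append, hih, hshift,
        pvPay, pvDlen, PySem.Str.len]
      ring

lemma pvJ_shape (b : Int) : ∀ (r : List (String × String)) (s : Int) (h : r ≠ []),
    ∃ pref, pvJ b s r = '【' :: pref ++ ('：' :: (r.getLast h).2.toList) ++ ['\n'] := by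
  intro r
  induction r with
  | nil => intro s h; exact absurd rfl h
  | cons p tail ih =>
    intro s _
    cases tail with
    | nil =>
      rw [pvJ_single]
      refine ⟨'第' :: (PySem.Int.toStr (s + 1)).toList ++ ("轮】（共" : String).toList
        ++ (PySem.Int.toStr b).toList ++ ("轮，自旧到新）" : String).toList
        ++ '\n' :: ("用户：" ++ p.1).toList ++ ['\n', '助', '手'], ?_⟩
      simp [String.toList_append, List.append_assoc]
    | cons q tl =>
      obtain ⟨pref', hp⟩ := ih (s + 1) (by simp)
      rw [pvJ_cons, hp]
      refine ⟨'第' :: (PySem.Int.toStr (s + 1)).toList ++ ("轮】（共" : String).toList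
        ++ (PySem.Int.toStr b).toList ++ ("轮，自旧到新）" : String).toList
        ++ '\n' :: ("用户：" ++ p.1).toList ++ '\n' :: ("助手：" ++ p.2).toList
        ++ '\n' :: '\n' :: '【' :: pref', ?_⟩
      have hlast : (p :: q :: tl).getLast (by simp) = (q :: tl).getLast (by simp) := by
        simp [List.getLast_cons]
      rw [hlast]
      simp [String.toList_append, List.append_assoc]

lemma pv_takeWhile_len_append (p : Char → Bool) (xs ys : List Char) (y : Char) (h : p y = false) :
    (List.takeWhile p (xs ++ y :: ys)).length = (List.takeWhile p xs).length := by
  rw [List.takeWhile_append]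
  split_ifs with hc
  · simp [h, hc]
  · rfl

lemma pv_rstrip_len (cs : List Char) :
    ((PySem.Chars.rstrip cs).length : Int) = cs.length - pvW cs := by
  have h := congrArg List.length
    (List.takeWhile_append_dropWhile (p := PySem.Chars.isspace) (l := cs.reverse))
  simp only [List.length_append, List.length_reverse] at h
  simp only [PySem.Chars.rstrip, pvW, List.length_reverse]
  omega

-- the formatted length in closed form
lemma pv_fmt_len (r : List (String × String)) (h : r ≠ []) :
    PySem.Str.len (pvFmt r) =
      pvPay r + pvDsum 0 r.length + (r.length : Int) * (19 + pvDlen (r.length : Int))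
        + 4 * r.length - 2 - (pvW (r.getLast h).2.toList : Int) := by
  have hJ : PySem.Str.len (pvFmt r) = ((PySem.Chars.strip (pvJ (r.length : Int) 0 r)).length : Int) := by
    simp only [pvFmt, pv_lines_eq, PySem.Str.strip, PySem.Str.join, PySem.Str.len,
      String.toList_ofList, pvJ]
    rfl
  obtain ⟨pref, hshape⟩ := pvJ_shape (r.length : Int) r 0 h
  have hlen := pvJ_len (r.length : Int) r 0 h
  -- lstrip is the identity: the first character is 【
  have hl : PySem.Chars.lstrip (pvJ (r.length : Int) 0 r) = pvJ (r.length : Int) 0 r := by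
    rw [hshape]
    simp only [PySem.Chars.lstrip, List.cons_append]
    exact List.dropWhile_cons_of_neg (by decide)
  -- trailing whitespace of the joined text: the final newline plus the last message's
  have hW : pvW (pvJ (r.length : Int) 0 r) = 1 + pvW (r.getLast h).2.toList := by
    rw [hshape]
    simp only [pvW, List.reverse_append, List.reverse_cons, List.reverse_nil, List.nil_append,
      List.append_assoc, List.cons_append]
    rw [List.takeWhile_cons_of_pos (by decide)]
    simp only [List.length_cons]
    rw [pv_takeWhile_len_append _ _ _ _ (by decide)]
    omega
  rw [hJ]
  simp only [PySem.Chars.strip, hl]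
  rw [pv_rstrip_len, hlen, hW]
  push_cast
  ring

lemma pv_pyGetD_neg_one (rounds : List (String × String)) (h : rounds ≠ []) (d : String × String) :
    PySem.List.pyGetD rounds (-1) d = rounds.getLast h := by
  cases rounds with
  | nil => exact absurd rfl h
  | cons p tl =>
    simp only [PySem.List.pyGetD, PySem.List.pyGet?, PySem.List.pyIdx?]
    norm_num
    simp [List.getLast_eq_getElem]
    rfl

lemma pv_trail_eq (s : String) :
    PySem.Str.len s - PySem.Str.len (PySem.Str.rstrip s) = (pvW s.toList : Int) := by
  have h := pv_rstrip_len s.toList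
  simp only [PySem.Str.len, PySem.Str.rstrip, String.toList_ofList]
  omega

lemma pv_dsum_succ (n : Nat) : pvDsum 0 (n + 1) = pvDsum 0 n + pvDlen (n + 1) := by
  simp [pvDsum, List.range_succ]

lemma pv_dsum_eq (n : Nat) :
    ((PySem.List.pyRange 1 ((n : Int) + 1)).map (fun i => PySem.Str.len (PySem.Int.toStr i))).sum
      = pvDsum 0 n := by
  induction n with
  | zero => norm_num [PySem.List.pyRange, pvDsum]
  | succ k ih =>
    have hb : (1:Int) ≤ (k:Int) + 1 := by omega
    have hcast : ((k+1:Nat):Int) + 1 = ((k:Int) + 1) + 1 := by push_cast; ring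
    rw [hcast, PySem.List.pyRange_one_succ_right hb]
    rw [List.map_append, List.sum_append, ih, pv_dsum_succ]
    simp [pvDlen]

lemma pv_main (max_chars t : Int) :
    ∀ (r : List (String × String)) (la : String),
      (∀ h : r ≠ [], (r.getLast h).2 = la) → t = (pvW la.toList : Int) →
      pvAgo max_chars r = pvBgo max_chars t r (r.length : Int) (pvPay r) (pvDsum 0 r.length) := by
  intro r
  induction r with
  | nil => intro la _ _; rfl
  | cons p tail ih =>
    intro la hla ht
    obtain ⟨u, a⟩ := p
    have hfl := pv_fmt_len ((u, a) :: tail) (by simp)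
    rw [hla (by simp)] at hfl
    have hB : pvPay ((u, a) :: tail) + pvDsum 0 ((u, a) :: tail).length
        + (((u, a) :: tail).length : Int) * (19 + PySem.Str.len (PySem.Int.toStr (((u, a) :: tail).length : Int)))
        + 4 * (((u, a) :: tail).length : Int) - 2 - t
        = PySem.Str.len (pvFmt ((u, a) :: tail)) := by
      rw [hfl, ht]
      simp [pvDlen]
    simp only [pvAgo, pvBgo]
    rw [hB]
    by_cases hc : PySem.Str.len (pvFmt ((u, a) :: tail)) ≤ max_chars
    · rw [if_neg (by omega), if_pos hc]
    · rw [if_pos (by omega), if_neg hc]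
      have e1 : ((((u, a) :: tail).length : Int)) - 1 = (tail.length : Int) := by
        simp
      have e2 : pvPay ((u, a) :: tail) - (PySem.Str.len u + PySem.Str.len a) = pvPay tail := by
        simp [pvPay]
      have e3 : pvDsum 0 ((u, a) :: tail).length
          - PySem.Str.len (PySem.Int.toStr (((u, a) :: tail).length : Int)) = pvDsum 0 tail.length := by
        simp only [List.length_cons]
        rw [pv_dsum_succ]
        simp [pvDlen]
      rw [e1, e2, e3]
      cases tail with
      | nil => rfl
      | cons q tl =>
        exact ih la (fun h2 => by rw [← hla (by simp)]; simp [List.getLast_cons]) ht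

-- ===== VERDICT (by name: the statement is the Claim_ definition above) =====
theorem truncate_rounds_by_char_budget_py_spec : Claim_equal_truncate_rounds_by_char_budget_py := by
  intro rounds max_chars _
  unfold Spec_truncate_rounds_by_char_budget_py truncate_rounds_by_char_budget_py
  cases rounds with
  | nil => rfl
  | cons p tl =>
    have hne : (p :: tl) ≠ [] := by simp
    simp only [truncate_rounds_by_char_budget_py_alt]
    rw [if_neg (by simp)]
    rw [pv_pyGetD_neg_one (p :: tl) hne, pv_trail_eq, pv_dsum_eq]
    exact pv_main max_chars _ (p :: tl) ((p :: tl).getLast hne).2 (fun _ => rfl) rfl
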